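-- pv_equiv track=rewrite | github.com/Muzzh/Codefights | TheCore/CornerOf0sAnd1s/ArrayPacking.py | arrayPacking
-- ===== SOURCE A (Python) =====
-- def arrayPacking(a):
--     res = 0
--     i = 0
--     shift = 0
--     for i in range(len(a)):
--         res += (a[i] << shift)
--         shift += 8
--         i += 1
--     return res
-- ===== SOURCE B (Python) =====
-- def arrayPacking(a):
--     res = 0
--     for x in reversed(a):
--         res = res * 256 + x
--     return res
-- ===== Notes on version B (the rewrite author's own statement) =====
-- stated objective: simpler
-- what changed: Replaces the index loop with an explicit shift counter by Horner's method over the reversed list (res = res*256 + x), dropping the shift state entirely.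
import Mathlib
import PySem

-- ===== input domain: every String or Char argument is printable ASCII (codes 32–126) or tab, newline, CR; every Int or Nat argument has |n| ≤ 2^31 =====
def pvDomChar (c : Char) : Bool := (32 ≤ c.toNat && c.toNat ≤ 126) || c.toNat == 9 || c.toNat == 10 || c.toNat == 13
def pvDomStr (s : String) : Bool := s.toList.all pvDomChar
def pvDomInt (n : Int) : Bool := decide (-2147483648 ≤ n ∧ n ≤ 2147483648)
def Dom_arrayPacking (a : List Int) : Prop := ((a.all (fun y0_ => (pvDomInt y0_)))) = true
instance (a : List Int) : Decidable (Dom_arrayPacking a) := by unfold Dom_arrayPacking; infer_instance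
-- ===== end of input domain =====

-- B replaces A's index loop with a shift counter by Horner's method over the reversed list (simpler).

-- ===== PORT A =====
-- for i in range(len(a)): res += a[i] << shift; shift += 8   (state = (res, shift))
def arrayPacking (a : List Int) : Int :=
  (PySem.List.pyRange 0 a.length 1).foldl
    (fun (st : Int × Int) i => (st.1 + (PySem.List.pyGetD a i 0) * 2 ^ st.2.toNat, st.2 + 8))
    (0, 0) |>.1

-- ===== PORT B =====
-- for x in reversed(a): res = res*256 + x
def arrayPacking_alt (a : List Int) : Int :=
  a.reverse.foldl (fun res x => res * 256 + x) 0

-- ===== PRECONDITION & SPEC =====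
def Spec_arrayPacking (a : List Int) (out : Int) : Prop := out = arrayPacking_alt a
instance (a : List Int) (out : Int) : Decidable (Spec_arrayPacking a out) := by unfold Spec_arrayPacking; infer_instance

-- ===== CLAIM (what is proved, stated in full; the proofs are below) =====
def Claim_equal_arrayPacking : Prop := ∀ (a : List Int), Dom_arrayPacking a → Spec_arrayPacking a (arrayPacking a)

-- ===== LEMMAS AND PROOFS =====

-- invariant of A's loop: result = res + 2^shift * Horner value of the rest
theorem arrayPacking_foldl_invariant (xs : List Int) (r s : Int) (hs : 0 ≤ s) :
    (xs.foldl (fun (st : Int × Int) x => (st.1 + x * 2 ^ st.2.toNat, st.2 + 8)) (r, s)).1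
      = r + 2 ^ s.toNat * xs.foldr (fun x acc => acc * 256 + x) 0 := by
  induction xs generalizing r s with
  | nil => simp
  | cons x xs ih =>
    simp only [List.foldl_cons, List.foldr_cons]
    rw [ih (r + x * 2 ^ s.toNat) (s + 8) (by omega)]
    have : (s + 8).toNat = s.toNat + 8 := by omega
    rw [this, pow_add]
    ring

-- ===== VERDICT (by name: the statement is the Claim_ definition above) =====

theorem arrayPacking_spec : Claim_equal_arrayPacking := by
  intro a _
  unfold Spec_arrayPacking arrayPacking arrayPacking_alt
  rw [PySem.List.foldl_pyRange_zero_pyGetD' a 0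
        (fun (st : Int × Int) x => (st.1 + x * 2 ^ st.2.toNat, st.2 + 8)) (0, 0)]
  rw [List.foldl_reverse, arrayPacking_foldl_invariant a 0 0 le_rfl]
  simp
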